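-- pv_equiv track=rewrite | github.com/shipmarty43/armbian-gui | modules/nrf24/nrf24_module.py | _identify_wifi_channels
-- ===== SOURCE A (Python) =====
-- from typing import List, Tuple, Callable
--
-- def _identify_wifi_channels(active_channels: List[int]) -> List[int]:
--     """Определение WiFi каналов из активных частот"""
--     wifi_channels = []
--
--     # WiFi канал 1: 2412 МГц (nRF24 каналы 7-17)
--     if any(ch in range(7, 18) for ch in active_channels):
--         wifi_channels.append(1)
--
--     # WiFi канал 6: 2437 МГц (nRF24 каналы 32-42)
--     if any(ch in range(32, 43) for ch in active_channels):
--         wifi_channels.append(6)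
--
--     # WiFi канал 11: 2462 МГц (nRF24 каналы 57-67)
--     if any(ch in range(57, 68) for ch in active_channels):
--         wifi_channels.append(11)
--
--     return wifi_channels
-- ===== SOURCE B (Python) =====
-- from typing import List
--
-- def _identify_wifi_channels(active_channels: List[int]) -> List[int]:
--     """Single pass: set a flag per WiFi channel, then render in fixed 1/6/11 order."""
--     f1 = f6 = f11 = False
--     for ch in active_channels:
--         if 7 <= ch <= 17:
--             f1 = True
--         elif 32 <= ch <= 42:
--             f6 = True
--         elif 57 <= ch <= 67:
--             f11 = True
--     out = []
--     if f1:
--         out.append(1)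
--     if f6:
--         out.append(6)
--     if f11:
--         out.append(11)
--     return out
-- ===== Notes on version B (the rewrite author's own statement) =====
-- stated objective: faster
-- what changed: Replaces three separate any-scans over the list (one per WiFi channel, each running the generator protocol per element) with a single fold that maintains three boolean flags and renders the fixed-order result afterwards.
import Mathlib
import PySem

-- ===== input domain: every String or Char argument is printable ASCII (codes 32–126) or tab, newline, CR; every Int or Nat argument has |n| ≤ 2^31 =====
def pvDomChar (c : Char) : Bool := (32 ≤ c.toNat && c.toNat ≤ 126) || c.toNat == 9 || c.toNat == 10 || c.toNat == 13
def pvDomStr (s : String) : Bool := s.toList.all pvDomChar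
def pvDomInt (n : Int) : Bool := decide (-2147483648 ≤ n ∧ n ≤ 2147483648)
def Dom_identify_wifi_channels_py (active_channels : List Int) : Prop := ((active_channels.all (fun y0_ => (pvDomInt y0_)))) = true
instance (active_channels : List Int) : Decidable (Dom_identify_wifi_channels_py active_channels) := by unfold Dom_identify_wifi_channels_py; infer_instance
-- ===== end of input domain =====

-- B replaces A's three repeated 'any' range-scans by one fold over the list keeping three flags (alternative decomposition).


-- ===== PORT A =====
-- A: three 'any' scans, appending 1 / 6 / 11 in order.
def identify_wifi_channels_py (active_channels : List Int) : List Int :=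
  let wifi_channels : List Int := []
  let wifi_channels :=
    if active_channels.any (fun ch => decide (7 ≤ ch ∧ ch < 18)) then wifi_channels ++ [1] else wifi_channels
  let wifi_channels :=
    if active_channels.any (fun ch => decide (32 ≤ ch ∧ ch < 43)) then wifi_channels ++ [6] else wifi_channels
  let wifi_channels :=
    if active_channels.any (fun ch => decide (57 ≤ ch ∧ ch < 68)) then wifi_channels ++ [11] else wifi_channels
  wifi_channels

-- ===== PORT B =====
-- B: one pass maintaining three flags, then render in fixed order.
def identify_wifi_channels_py_alt (active_channels : List Int) : List Int :=
  let flags := active_channels.foldl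
    (fun (s : Bool × Bool × Bool) ch =>
      if 7 ≤ ch ∧ ch ≤ 17 then (true, s.2.1, s.2.2)
      else if 32 ≤ ch ∧ ch ≤ 42 then (s.1, true, s.2.2)
      else if 57 ≤ ch ∧ ch ≤ 67 then (s.1, s.2.1, true)
      else s)
    (false, false, false)
  (if flags.1 then [1] else []) ++ (if flags.2.1 then [6] else []) ++ (if flags.2.2 then [11] else [])

-- ===== PRECONDITION & SPEC =====
def Spec_identify_wifi_channels_py (active_channels : List Int) (out : List Int) : Prop := out = identify_wifi_channels_py_alt active_channels
instance (active_channels : List Int) (out : List Int) : Decidable (Spec_identify_wifi_channels_py active_channels out) := by unfold Spec_identify_wifi_channels_py; infer_instance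

-- ===== CLAIM (what is proved, stated in full; the proofs are below) =====
def Claim_equal_identify_wifi_channels_py : Prop := ∀ (active_channels : List Int), Dom_identify_wifi_channels_py active_channels → Spec_identify_wifi_channels_py active_channels (identify_wifi_channels_py active_channels)

-- ===== LEMMAS AND PROOFS =====
-- The fold's three flags equal the three 'any' scans (invariant proved by induction).
theorem flags_spec (l : List Int) (s : Bool × Bool × Bool) :
    l.foldl
      (fun (s : Bool × Bool × Bool) ch =>
        if 7 ≤ ch ∧ ch ≤ 17 then (true, s.2.1, s.2.2)
        else if 32 ≤ ch ∧ ch ≤ 42 then (s.1, true, s.2.2)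
        else if 57 ≤ ch ∧ ch ≤ 67 then (s.1, s.2.1, true)
        else s) s
    = (s.1 || l.any (fun ch => decide (7 ≤ ch ∧ ch < 18)),
       s.2.1 || l.any (fun ch => decide (32 ≤ ch ∧ ch < 43)),
       s.2.2 || l.any (fun ch => decide (57 ≤ ch ∧ ch < 68))) := by
  induction l generalizing s with
  | nil => simp
  | cons x xs ih =>
    simp only [List.foldl_cons, List.any_cons]
    rw [ih]
    have e1 : decide (7 ≤ x ∧ x < 18) = decide (7 ≤ x ∧ x ≤ 17) := by
      simp only [decide_eq_decide]; omega
    have e2 : decide (32 ≤ x ∧ x < 43) = decide (32 ≤ x ∧ x ≤ 42) := by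
      simp only [decide_eq_decide]; omega
    have e3 : decide (57 ≤ x ∧ x < 68) = decide (57 ≤ x ∧ x ≤ 67) := by
      simp only [decide_eq_decide]; omega
    rw [e1, e2, e3]
    by_cases h1 : 7 ≤ x ∧ x ≤ 17 <;> by_cases h2 : 32 ≤ x ∧ x ≤ 42 <;>
      by_cases h3 : 57 ≤ x ∧ x ≤ 67 <;>
      first
      | (exfalso; omega)
      | (simp [h1, h2, h3, Bool.or_assoc])

-- ===== VERDICT (by name: the statement is the Claim_ definition above) =====
theorem identify_wifi_channels_py_spec : Claim_equal_identify_wifi_channels_py := by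
  intro l _
  unfold Spec_identify_wifi_channels_py identify_wifi_channels_py identify_wifi_channels_py_alt
  rw [flags_spec]
  rcases h1 : l.any (fun ch => decide (7 ≤ ch ∧ ch < 18)) <;>
  rcases h6 : l.any (fun ch => decide (32 ≤ ch ∧ ch < 43)) <;>
  rcases h11 : l.any (fun ch => decide (57 ≤ ch ∧ ch < 68)) <;>
    simp only [h1, h6, h11, Bool.false_or, if_true, if_false, cond_true, cond_false,
      List.nil_append, List.append_nil, ite_true, ite_false] <;> rfl
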